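-- pv_equiv track=rewrite | github.com/raihanraazofficial/SESGRG_v5 | backend/sheets_service.py | _parse_research_areas
-- ===== SOURCE A (Python) =====
-- from typing import List, Dict, Any, Optional
--
-- def _parse_research_areas(areas_input) -> List[str]:
--     """Parse research areas string or list into list"""
--     if not areas_input:
--         return []
--
--     # If it's already a list, return it
--     if isinstance(areas_input, list):
--         return [str(area).strip() for area in areas_input if str(area).strip()]
--
--     # If it's a string, split by comma
--     if isinstance(areas_input, str):
--         return [area.strip() for area in areas_input.split(',') if area.strip()]
--
--     # Fallback
--     return [str(areas_input).strip()] if str(areas_input).strip() else []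
-- ===== SOURCE B (Python) =====
-- def _parse_research_areas(areas_input):
--     """Parse research areas string or list into list (single-pass scanner for strings)."""
--     if not areas_input:
--         return []
--     if isinstance(areas_input, str):
--         # one pass over the characters: split on commas and strip/filter as we go
--         result = []
--         cur = []
--         for ch in areas_input + ',':
--             if ch == ',':
--                 tok = ''.join(cur).strip()
--                 if tok:
--                     result.append(tok)
--                 cur = []
--             else:
--                 cur.append(ch)
--         return result
--     if isinstance(areas_input, list):
--         return [s for s in (str(x).strip() for x in areas_input) if s]
--     s = str(areas_input).strip()
--     return [s] if s else []
-- ===== Notes on version B (the rewrite author's own statement) =====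
-- stated objective: alternative
-- what changed: Replaces the comma split followed by a strip-and-filter comprehension with a single character-level scanner that builds, strips and filters tokens in one pass over the string.
import Mathlib
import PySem

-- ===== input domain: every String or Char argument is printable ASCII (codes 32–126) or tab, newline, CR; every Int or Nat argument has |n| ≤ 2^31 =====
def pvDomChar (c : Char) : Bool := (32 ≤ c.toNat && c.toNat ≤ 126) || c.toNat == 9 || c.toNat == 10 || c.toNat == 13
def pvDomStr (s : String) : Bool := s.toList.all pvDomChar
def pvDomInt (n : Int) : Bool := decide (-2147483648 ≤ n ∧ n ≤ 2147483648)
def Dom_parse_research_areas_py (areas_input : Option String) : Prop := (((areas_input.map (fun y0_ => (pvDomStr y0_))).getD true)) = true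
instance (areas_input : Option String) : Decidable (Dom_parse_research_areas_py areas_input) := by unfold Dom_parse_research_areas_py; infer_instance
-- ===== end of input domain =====

-- B replaces the comma split + strip/filter comprehension by a one-pass character scanner; same output, similar cost.
-- (Under the Option String type convention only the None/str branches of the Python are reachable.)

-- ===== PORT A =====
-- branch order of A kept: falsy guard, then the comma split with its strip-and-filter comprehension
def parse_research_areas_py (areas_input : Option String) : List String :=
  match areas_input with
  | none => []                      -- 'if not areas_input: return []' (None is falsy)
  | some s =>
    if s = "" then []               -- empty string is falsy too
    else
      ((PySem.Chars.splitOn s.toList [',']).filter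
          (fun area => !(PySem.Chars.strip area).isEmpty)).map
        (fun area => String.ofList (PySem.Chars.strip area))

-- ===== PORT B =====
-- one scanner step: on a comma flush the stripped current token (if nonempty), else extend it
def pvScanStep (st : List String × List Char) (c : Char) : List String × List Char :=
  if c = ',' then
    let tok := PySem.Chars.strip st.2
    (if tok.isEmpty then st.1 else st.1 ++ [String.ofList tok], [])
  else (st.1, st.2 ++ [c])

def parse_research_areas_py_alt (areas_input : Option String) : List String :=
  match areas_input with
  | none => []
  | some s =>
    if s = "" then []
    else ((s.toList ++ [',']).foldl pvScanStep ([], [])).1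

-- ===== PRECONDITION & SPEC =====
def Spec_parse_research_areas_py (areas_input : Option String) (out : List String) : Prop := out = parse_research_areas_py_alt areas_input
instance (areas_input : Option String) (out : List String) : Decidable (Spec_parse_research_areas_py areas_input out) := by unfold Spec_parse_research_areas_py; infer_instance

-- ===== CLAIM (what is proved, stated in full; the proofs are below) =====
def Claim_equal_parse_research_areas_py : Prop := ∀ (areas_input : Option String), Dom_parse_research_areas_py areas_input → Spec_parse_research_areas_py areas_input (parse_research_areas_py areas_input)

-- ===== LEMMAS AND PROOFS =====

-- reference splitter: pre is the (in-order) token built so far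
def pvMySplit (pre : List Char) : List Char → List (List Char)
  | [] => [pre]
  | c :: rest => if c = ',' then pre :: pvMySplit [] rest else pvMySplit (pre ++ [c]) rest

theorem pvGo_spec (l : List Char) : ∀ (fuel : Nat), l.length < fuel → ∀ (cur : List Char) (acc : List (List Char)),
    PySem.Chars.splitOn.go [','] fuel l cur acc = acc.reverse ++ pvMySplit cur.reverse l := by
  induction l with
  | nil =>
    intro fuel h cur acc
    match fuel, h with
    | fuel + 1, _ => simp [PySem.Chars.splitOn.go, pvMySplit]
  | cons c rest ih =>
    intro fuel h cur acc
    match fuel, h with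
    | fuel + 1, h =>
      by_cases hc : c = ','
      · subst hc
        simp only [PySem.Chars.splitOn.go, List.isPrefixOf, BEq.rfl, Bool.true_and,
          if_true]
        show PySem.Chars.splitOn.go [','] fuel rest [] (cur.reverse :: acc) = _
        rw [ih fuel (by simpa using h) [] (cur.reverse :: acc)]
        simp [pvMySplit]
      · have hpre : List.isPrefixOf [','] (c :: rest) = false := by
          simp only [List.isPrefixOf, Bool.and_true]
          exact beq_eq_false_iff_ne.mpr (Ne.symm hc)
        simp only [PySem.Chars.splitOn.go, hpre, Bool.false_eq_true, if_false]
        rw [ih fuel (by simpa using h) (c :: cur) acc]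
        simp [pvMySplit, hc]

theorem pvSplitOn_eq (s : List Char) : PySem.Chars.splitOn s [','] = pvMySplit [] s := by
  have := pvGo_spec s (s.length + 1) (by omega) [] []
  simpa [PySem.Chars.splitOn] using this

theorem pvScan_spec (cs : List Char) : ∀ (res : List String) (cur : List Char),
    ((cs ++ [',']).foldl pvScanStep (res, cur)).1 =
      res ++ ((pvMySplit cur cs).filter (fun a => !(PySem.Chars.strip a).isEmpty)).map
        (fun a => String.ofList (PySem.Chars.strip a)) := by
  induction cs with
  | nil =>
    intro res cur
    simp [pvScanStep, pvMySplit]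
    by_cases h : PySem.Chars.strip cur = [] <;> simp [h]
  | cons c cs ih =>
    intro res cur
    by_cases hc : c = ','
    · subst hc
      simp only [List.cons_append, List.foldl_cons, pvScanStep, if_true, pvMySplit]
      rw [ih]
      by_cases h : PySem.Chars.strip cur = [] <;> simp [h]
    · simp only [List.cons_append, List.foldl_cons, pvScanStep, if_neg hc]
      rw [ih]
      simp [pvMySplit, hc]

-- ===== VERDICT (by name: the statement is the Claim_ definition above) =====
theorem parse_research_areas_py_spec : Claim_equal_parse_research_areas_py := by
  intro areas_input _
  unfold Spec_parse_research_areas_py parse_research_areas_py parse_research_areas_py_alt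
  match areas_input with
  | none => rfl
  | some s =>
    by_cases hs : s = ""
    · simp [hs]
    · simp only [if_neg hs]
      rw [pvScan_spec s.toList [] [], pvSplitOn_eq]
      simp
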